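-- pv_equiv track=rewrite | github.com/dwarfmaster/MPSI | ipt/recursive/mults/mults.py | mults
-- ===== SOURCE A (Python) =====
-- def mults(s, n):
--     mlts = []
--     if n == 1:
--         for e in s:
--             mlts.append([e])
--         return mlts
--
--     for e in s:
--         m = mults(s, n - 1)
--         for l in m:
--             mlts.append([e] + l)
--     return mlts
-- ===== SOURCE B (Python) =====
-- def mults(s, n):
--     # Iterative: build the length-k power bottom-up, computing each subproblem once.
--     res = [[e] for e in s]
--     for _ in range(n - 1):
--         sub = res
--         res = [[e] + l for e in s for l in sub]
--     return res
-- ===== Notes on version B (the rewrite author's own statement) =====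
-- stated objective: faster
-- what changed: Replaced the recursion that recomputes mults(s,n-1) once per element of s with a bottom-up loop that computes each level exactly once.
import Mathlib
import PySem

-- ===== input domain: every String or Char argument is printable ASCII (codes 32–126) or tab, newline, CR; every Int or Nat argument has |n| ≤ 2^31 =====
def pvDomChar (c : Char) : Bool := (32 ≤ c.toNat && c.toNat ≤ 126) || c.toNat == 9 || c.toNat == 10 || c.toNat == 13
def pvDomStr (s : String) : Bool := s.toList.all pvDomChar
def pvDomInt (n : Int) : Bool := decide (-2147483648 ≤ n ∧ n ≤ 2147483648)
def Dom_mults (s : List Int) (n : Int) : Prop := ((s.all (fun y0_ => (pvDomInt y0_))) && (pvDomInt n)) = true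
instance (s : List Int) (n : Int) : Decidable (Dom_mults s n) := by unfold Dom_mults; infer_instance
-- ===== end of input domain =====

-- B replaces A's recursion (which recomputes mults(s,n-1) once per element of s)
-- with a bottom-up loop computing each level once; return values agree on Pre_.


-- ===== PORT A =====
-- A's recursion on n, fueled by n.toNat (enough fuel for every n admitted by Pre_;
-- for n ≤ 0 with s ≠ [] the Python recurses forever, excluded by Pre_).
def multsF (s : List Int) : Nat → Int → List (List Int)
  | 0, _ => []
  | fuel + 1, n =>
    if n = 1 then
      s.foldl (fun mlts e => mlts ++ [[e]]) []
    else
      s.foldl (fun mlts e =>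
        mlts ++ (multsF s fuel (n - 1)).map (fun l => e :: l)) []

def mults (s : List Int) (n : Int) : List (List Int) := multsF s n.toNat n

-- ===== PORT B =====
def mults_alt (s : List Int) (n : Int) : List (List Int) :=
  (PySem.List.pyRange 0 (n - 1) 1).foldl
    (fun res _ => s.flatMap (fun e => res.map (fun l => e :: l)))
    (s.map (fun e => [e]))

-- ===== PRECONDITION & SPEC =====
-- Pre_ excludes n ≤ 0 with nonempty s: there the Python A recurses forever (RecursionError).
def Pre_mults (s : List Int) (n : Int) : Prop := 1 ≤ n ∨ s = []
instance (s : List Int) (n : Int) : Decidable (Pre_mults s n) := by unfold Pre_mults; infer_instance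
def pvWitness_mults : List Int × Int := ([1, 2], 3)

def Spec_mults (s : List Int) (n : Int) (out : List (List Int)) : Prop := out = mults_alt s n
instance (s : List Int) (n : Int) (out : List (List Int)) : Decidable (Spec_mults s n out) := by unfold Spec_mults; infer_instance

-- ===== CLAIM (what is proved, stated in full; the proofs are below) =====
def Claim_equal_mults : Prop := ∀ (s : List Int) (n : Int), Dom_mults s n → Pre_mults s n → Spec_mults s n (mults s n)

-- ===== LEMMAS AND PROOFS =====

-- one step of B's loop
def multsStep (s : List Int) (res : List (List Int)) : List (List Int) :=
  s.flatMap (fun e => res.map (fun l => e :: l))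

theorem foldl_const_iterate {α β : Type} (f : β → β) (l : List α) (b : β) :
    l.foldl (fun r _ => f r) b = f^[l.length] b := by
  induction l generalizing b with
  | nil => rfl
  | cons x xs ih => simp [List.foldl_cons, ih, Function.iterate_succ_apply]

theorem foldl_append_map {α : Type} (f : α → List (List Int)) (s : List α)
    (acc : List (List Int)) :
    s.foldl (fun m e => m ++ f e) acc = acc ++ s.flatMap f := by
  induction s generalizing acc with
  | nil => simp
  | cons x xs ih => simp [List.foldl_cons, ih]

theorem multsF_succ (s : List Int) (fuel : Nat) (n : Int) :
    multsF s (fuel + 1) n =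
      (if n = 1 then
        s.foldl (fun mlts e => mlts ++ [[e]]) []
      else
        s.foldl (fun mlts e =>
          mlts ++ (multsF s fuel (n - 1)).map (fun l => e :: l)) []) := rfl

theorem multsF_eq (s : List Int) (k : Nat) :
    multsF s (k + 1) ((k : Int) + 1) = (multsStep s)^[k] (s.map (fun e => [e])) := by
  induction k with
  | zero =>
      have h0 : ((0 : Nat) : Int) + 1 = 1 := by norm_num
      rw [multsF_succ, if_pos h0, foldl_append_map (fun e => [[e]]) s []]
      simp only [Function.iterate_zero, id, List.nil_append]
      induction s with
      | nil => rfl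
      | cons x xs ihs => simp [List.flatMap_cons, ihs]
  | succ k ih =>
      have hne : ((k + 1 : Nat) : Int) + 1 ≠ 1 := by push_cast; omega
      rw [multsF_succ, if_neg hne]
      have h1 : ((k + 1 : Nat) : Int) + 1 - 1 = (k : Int) + 1 := by push_cast; ring
      rw [h1, ih, foldl_append_map, Function.iterate_succ_apply']
      rfl

theorem mults_alt_eq_iterate (s : List Int) (n : Int) :
    mults_alt s n = (multsStep s)^[(n - 1).toNat] (s.map (fun e => [e])) := by
  unfold mults_alt
  rw [foldl_const_iterate, PySem.List.length_pyRange_one]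
  have h : (n - 1 - 0).toNat = (n - 1).toNat := by omega
  rw [h]
  rfl

theorem step_nil (s : List Int) : multsStep s [] = [] := by
  simp [multsStep]

theorem iterate_step_nil (s : List Int) (k : Nat) :
    (multsStep s)^[k] ([] : List (List Int)) = [] := by
  induction k with
  | zero => rfl
  | succ k ih => rw [Function.iterate_succ_apply, step_nil, ih]

-- ===== VERDICT (by name: the statement is the Claim_ definition above) =====
theorem mults_spec : Claim_equal_mults := by
  intro s n _ hpre
  unfold Spec_mults mults
  rcases hpre with hn | hs
  · obtain ⟨k, hk⟩ : ∃ k : Nat, n = (k : Int) + 1 :=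
      ⟨(n - 1).toNat, by omega⟩
    subst hk
    have htn : ((k : Int) + 1).toNat = k + 1 := by omega
    rw [htn, multsF_eq, mults_alt_eq_iterate]
    have : ((k : Int) + 1 - 1).toNat = k := by omega
    rw [this]
  · subst hs
    rw [mults_alt_eq_iterate]
    simp only [List.map_nil, iterate_step_nil]
    rcases h : n.toNat with _ | k
    · rfl
    · rw [multsF_succ]
      split <;> rfl
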